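-- pv_equiv track=rewrite | github.com/blackviking27/DSA-450-Python | dynamic_programming/19.py | productSubSeqCount
-- ===== SOURCE A (Python) =====
-- def productSubSeqCount(arr, k):
--     n = len(arr)
--     # dp[i][j] stores the max number of subsequence which has sum less than i with j terms
--     dp = [[0 for i in range(n + 1)] for j in range(k + 1)]
--
--     for i in range(1, k + 1):
--         for j in range(1, n + 1):
--             # taking the previous answer and then we add the number
--             # of subsequence possible with current element
--             # to the dp
--             dp[i][j] = dp[i][j -1]
--
--             if arr[j -1] <= i and arr[j -1] > 0:
--                 dp[i][j] += dp[i // arr[j - 1]][j - 1] + 1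
--     return dp[k][n]
--
-- k = 10
-- ===== SOURCE B (Python) =====
-- def productSubSeqCount(arr, k):
--     n = len(arr)
--     # top-down: the cap values reachable at each level; levels[d] is the cap set
--     # for states with the first n-d elements (levels[0] = {k} at the top)
--     cur = {k}
--     levels = [cur]
--     for j in range(n, 0, -1):
--         a = arr[j - 1]
--         cur = cur | {c // a for c in cur if 0 < a <= c}
--         levels.append(cur)
--     # bottom-up: counts only over the reachable caps
--     prev = {c: 0 for c in levels[n]}
--     for j in range(1, n + 1):
--         a = arr[j - 1]
--         fj = {}
--         for c in levels[n - j]: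
--             v = prev[c] if c > 0 else 0
--             if 0 < a <= c:
--                 v += prev[c // a] + 1
--             fj[c] = v
--         prev = fj
--     return prev[k] if k > 0 else 0
-- ===== Notes on version B (the rewrite author's own statement) =====
-- stated objective: faster
-- what changed: Replaced the dense (k+1)x(n+1) bottom-up DP table with a top-down reachability pass that collects the cap values actually reachable from (n, k) followed by a bottom-up evaluation over those sparse per-level cap sets only.
import Mathlib
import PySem

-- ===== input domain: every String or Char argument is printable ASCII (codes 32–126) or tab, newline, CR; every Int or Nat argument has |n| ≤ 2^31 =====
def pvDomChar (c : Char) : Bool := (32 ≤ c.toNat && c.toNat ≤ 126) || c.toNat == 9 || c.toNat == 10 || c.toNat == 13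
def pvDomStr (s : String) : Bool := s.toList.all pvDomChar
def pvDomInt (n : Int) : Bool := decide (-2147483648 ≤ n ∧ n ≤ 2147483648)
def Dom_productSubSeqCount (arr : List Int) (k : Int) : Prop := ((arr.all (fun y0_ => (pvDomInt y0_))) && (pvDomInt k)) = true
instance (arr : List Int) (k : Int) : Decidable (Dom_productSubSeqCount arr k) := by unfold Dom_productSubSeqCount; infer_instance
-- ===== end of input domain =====

-- B replaces the dense (k+1)x(n+1) DP table with top-down reachability of caps plus a bottom-up
-- sparse evaluation over the reachable (level, cap) states only.

-- ===== PORT A =====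
-- The outer Python list dp is ported as an Array so that its subscripts are O(1); aGet/aSet are
-- hand-ported list subscripts, exact for the nonnegative in-range indices this program uses
-- (every dp subscript A performs is such an index once Pre_ excludes k < 0).
def aGet (dp : Array (List Int)) (i : Int) : List Int := dp.getD i.toNat []

def aSet (dp : Array (List Int)) (i : Int) (row : List Int) : Array (List Int) :=
  dp.setIfInBounds i.toNat row

-- one inner-loop body: dp[i][j] = dp[i][j-1]; if arr[j-1] <= i and arr[j-1] > 0: dp[i][j] += dp[i//arr[j-1]][j-1] + 1
def aStep (arr : List Int) (i : Int) (dp : Array (List Int)) (j : Int) : Array (List Int) :=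
  let row := aGet dp i
  let row1 := PySem.List.pySetD row j (PySem.List.pyGetD row (j - 1) 0)
  let dp1 := aSet dp i row1
  let a := PySem.List.pyGetD arr (j - 1) 0
  if a ≤ i ∧ 0 < a then
    let row2 := aGet dp1 i
    aSet dp1 i
      (PySem.List.pySetD row2 j
        (PySem.List.pyGetD row2 j 0 +
          (PySem.List.pyGetD (aGet dp1 (PySem.Int.floordiv i a)) (j - 1) 0 + 1)))
  else dp1

def aOuter (arr : List Int) (n : Int) (dp : Array (List Int)) (i : Int) : Array (List Int) :=
  (PySem.List.pyRange 1 (n + 1) 1).foldl (aStep arr i) dp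

def productSubSeqCount (arr : List Int) (k : Int) : Int :=
  let n : Int := PySem.List.len arr
  let dp0 : Array (List Int) :=
    ((PySem.List.pyRange 0 (k + 1) 1).map
      (fun _ => (PySem.List.pyRange 0 (n + 1) 1).map (fun _ => (0 : Int)))).toArray
  let dp := (PySem.List.pyRange 1 (k + 1) 1).foldl (aOuter arr n) dp0
  PySem.List.pyGetD (aGet dp k) n 0

-- ===== PORT B =====
-- one reachability step: cur | {c // a for c in cur if 0 < a <= c}
def bLevelStep (a : Int) (cur : PySem.Set Int) : PySem.Set Int :=
  PySem.Set.union cur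
    ((cur.filter (fun c => decide (0 < a ∧ a ≤ c))).map (fun c => PySem.Int.floordiv c a))

-- body of the downward loop: a = arr[j-1]; cur = cur | {...}; levels.append(cur)
def bDown (arr : List Int) (st : List (PySem.Set Int) × PySem.Set Int) (j : Int) :
    List (PySem.Set Int) × PySem.Set Int :=
  let a := PySem.List.pyGetD arr (j - 1) 0
  let cur := bLevelStep a st.2
  (st.1 ++ [cur], cur)

-- body of the upward loop: fj = {}; for c in levels[n-j]: ...; prev = fj
def bUp (arr : List Int) (levels : List (PySem.Set Int)) (n : Int)
    (prev : PySem.Dict Int Int) (j : Int) : PySem.Dict Int Int :=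
  let a := PySem.List.pyGetD arr (j - 1) 0
  let lv := PySem.List.pyGetD levels (n - j) []
  lv.foldl (fun fj c =>
    let v := if 0 < c then prev.getD c 0 else 0
    let v := if 0 < a ∧ a ≤ c then v + (prev.getD (PySem.Int.floordiv c a) 0 + 1) else v
    fj.insert c v) PySem.Dict.empty

def productSubSeqCount_alt (arr : List Int) (k : Int) : Int :=
  let n : Int := PySem.List.len arr
  let levels :=
    ((PySem.List.pyRange n 0 (-1)).foldl (bDown arr)
      ([PySem.Set.ofList [k]], PySem.Set.ofList [k])).1
  let prev0 := (PySem.List.pyGetD levels n []).foldl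
    (fun (d : PySem.Dict Int Int) c => d.insert c (0 : Int)) PySem.Dict.empty
  let prev := (PySem.List.pyRange 1 (n + 1) 1).foldl (bUp arr levels n) prev0
  if 0 < k then prev.getD k 0 else 0

-- ===== PRECONDITION & SPEC =====
-- A raises IndexError when k < 0 (dp is then the empty list and dp[k] is read); Pre_ excludes exactly those inputs.
def Pre_productSubSeqCount (arr : List Int) (k : Int) : Prop := 0 ≤ k
instance (arr : List Int) (k : Int) : Decidable (Pre_productSubSeqCount arr k) := by
  unfold Pre_productSubSeqCount; infer_instance

def pvWitness_productSubSeqCount : List Int × Int := ([1, 2, 3], 4)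

def Spec_productSubSeqCount (arr : List Int) (k : Int) (out : Int) : Prop := out = productSubSeqCount_alt arr k
instance (arr : List Int) (k : Int) (out : Int) : Decidable (Spec_productSubSeqCount arr k out) := by
  unfold Spec_productSubSeqCount; infer_instance

-- ===== CLAIM (what is proved, stated in full; the proofs are below) =====
def Claim_equal_productSubSeqCount : Prop := ∀ (arr : List Int) (k : Int), Dom_productSubSeqCount arr k → Pre_productSubSeqCount arr k → Spec_productSubSeqCount arr k (productSubSeqCount arr k)

-- ===== LEMMAS AND PROOFS =====

-- the common mathematical recursion both ports compute:
-- pureCount arr j cap = number of non-empty subsequences of the first j elements with product ≤ cap,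
-- counted exactly as both programs count it.
def pureCount (arr : List Int) : Nat → Int → Int
  | 0, _ => 0
  | j + 1, cap =>
    if cap ≤ 0 then 0
    else
      let a := PySem.List.pyGetD arr (j : Int) 0
      pureCount arr j cap +
        (if 0 < a ∧ a ≤ cap then pureCount arr j (PySem.Int.floordiv cap a) + 1 else 0)

theorem pureCount_nonpos (arr : List Int) (j : Nat) (cap : Int) (h : cap ≤ 0) :
    pureCount arr j cap = 0 := by
  cases j with
  | zero => rfl
  | succ j => simp [pureCount, h]

-- ----- B-side: level sets and the sparse-evaluation invariant -----
-- the set of caps reachable at distance d below the top state (n, k)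
def Tlv (arr : List Int) (k : Int) : Nat → PySem.Set Int
  | 0 => PySem.Set.ofList [k]
  | d + 1 =>
    bLevelStep (PySem.List.pyGetD arr ((arr.length : Int) - d - 1) 0) (Tlv arr k d)

theorem Tlv_nodup (arr : List Int) (k : Int) : ∀ d, (Tlv arr k d).Nodup := by
  intro d
  induction d with
  | zero => exact PySem.Set.nodup_ofList [k]
  | succ d ih => exact PySem.Set.nodup_union _ _ ih

theorem mem_Tlv_succ (arr : List Int) (k : Int) (d : Nat) (c : Int)
    (hc : c ∈ Tlv arr k d) : c ∈ Tlv arr k (d + 1) := by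
  unfold Tlv bLevelStep
  rw [PySem.Set.mem_union]
  exact Or.inl hc

theorem mem_Tlv_div (arr : List Int) (k : Int) (d : Nat) (c : Int)
    (hc : c ∈ Tlv arr k d)
    (ha : 0 < PySem.List.pyGetD arr ((arr.length : Int) - d - 1) 0 ∧
          PySem.List.pyGetD arr ((arr.length : Int) - d - 1) 0 ≤ c) :
    PySem.Int.floordiv c (PySem.List.pyGetD arr ((arr.length : Int) - d - 1) 0) ∈
      Tlv arr k (d + 1) := by
  unfold Tlv bLevelStep
  rw [PySem.Set.mem_union]
  exact Or.inr (List.mem_map.mpr ⟨c, List.mem_filter.mpr ⟨hc, by simpa using ha⟩, rfl⟩)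

-- the downward loop builds exactly [Tlv 0, …, Tlv n]
theorem levels_fold (arr : List Int) (k : Int) :
    ∀ (m : Nat), m ≤ arr.length →
      (PySem.List.pyRange (m : Int) 0 (-1)).foldl (bDown arr)
        ((List.range (arr.length - m + 1)).map (Tlv arr k), Tlv arr k (arr.length - m)) =
      ((List.range (arr.length + 1)).map (Tlv arr k), Tlv arr k arr.length) := by
  intro m
  induction m with
  | zero =>
    intro _
    rw [show ((0 : Nat) : Int) = 0 from rfl,
      PySem.List.pyRange_neg_one_eq_nil (le_refl (0 : Int)), List.foldl_nil]
    simp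
  | succ m ih =>
    intro h
    rw [PySem.List.pyRange_neg_one_cons (by omega : (0 : Int) < ((m + 1 : Nat) : Int)),
      List.foldl_cons]
    have hstep : bDown arr
        ((List.range (arr.length - (m + 1) + 1)).map (Tlv arr k),
          Tlv arr k (arr.length - (m + 1))) ((m + 1 : Nat) : Int) =
        ((List.range (arr.length - m + 1)).map (Tlv arr k), Tlv arr k (arr.length - m)) := by
      unfold bDown
      dsimp only
      have hcur : bLevelStep (PySem.List.pyGetD arr (((m + 1 : Nat) : Int) - 1) 0)
          (Tlv arr k (arr.length - (m + 1))) = Tlv arr k (arr.length - m) := by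
        rw [show arr.length - m = (arr.length - (m + 1)) + 1 by omega]
        conv_rhs => rw [Tlv]
        congr 2
        omega
      rw [hcur]
      refine Prod.ext ?_ rfl
      dsimp only
      rw [show arr.length - m = arr.length - (m + 1) + 1 by omega]
      simp [List.range_succ]
    rw [hstep, show ((m + 1 : Nat) : Int) - 1 = ((m : Nat) : Int) by omega]
    exact ih (by omega)

theorem levels_eq (arr : List Int) (k : Int) :
    ((PySem.List.pyRange ((arr.length : Nat) : Int) 0 (-1)).foldl (bDown arr)
      ([PySem.Set.ofList [k]], PySem.Set.ofList [k])).1 =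
    (List.range (arr.length + 1)).map (Tlv arr k) := by
  have h := levels_fold arr k arr.length (le_refl _)
  rw [Nat.sub_self] at h
  simpa using congrArg Prod.fst h

theorem levels_get (arr : List Int) (k : Int) (t : Nat) (ht : t ≤ arr.length) :
    PySem.List.pyGetD ((List.range (arr.length + 1)).map (Tlv arr k)) ((t : Nat) : Int) [] =
      Tlv arr k t := by
  rw [PySem.List.pyGetD_natCast, List.getD_eq_getElem?_getD, List.getElem?_map,
    List.getElem?_range (by omega)]
  rfl

-- a fold of fresh inserts over a duplicate-free key list: lookup is the inserted value
theorem build_get? (l : List Int) (hl : l.Nodup) (g : Int → Int) (c : Int) (hc : c ∈ l) :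
    (l.foldl (fun d c => d.insert c (g c)) (PySem.Dict.empty : PySem.Dict Int Int)).get? c =
      some (g c) := by
  apply PySem.Dict.get?_of_mem_items
  · rw [PySem.Dict.items_foldl_insert_fresh l (fun c => c) g PySem.Dict.empty
      (fun a _ => PySem.Dict.contains_empty a) (by simpa using hl)]
    exact List.mem_append.mpr (Or.inr (List.mem_map.mpr ⟨c, hc, rfl⟩))
  · exact PySem.Dict.nodup_keys_foldl_insert l (fun _ c => g c) _ PySem.Dict.nodup_keys_empty

-- invariant of the upward loop: after level j, prev holds pureCount j on every reachable cap
def InvB (arr : List Int) (k : Int) (j : Nat) (prev : PySem.Dict Int Int) : Prop :=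
  ∀ c ∈ Tlv arr k (arr.length - j), prev.get? c = some (pureCount arr j c)

theorem bUp_inv (arr : List Int) (k : Int) (j : Int)
    (h1j : 1 ≤ j) (hjn : j ≤ (arr.length : Int))
    (prev : PySem.Dict Int Int) (H : InvB arr k (j.toNat - 1) prev) :
    InvB arr k j.toNat
      (bUp arr ((List.range (arr.length + 1)).map (Tlv arr k)) (arr.length : Int) prev j) := by
  intro c hc
  unfold bUp
  dsimp only
  have hlv : PySem.List.pyGetD ((List.range (arr.length + 1)).map (Tlv arr k))
      ((arr.length : Int) - j) ([] : PySem.Set Int) = Tlv arr k (arr.length - j.toNat) := by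
    rw [show ((arr.length : Int) - j) = ((arr.length - j.toNat : Nat) : Int) by omega]
    exact levels_get arr k _ (by omega)
  rw [hlv]
  rw [build_get? _ (Tlv_nodup arr k _) _ c hc]
  congr 1
  have hidx : ((arr.length : Int) - ((arr.length - j.toNat : Nat) : Int) - 1) = j - 1 := by omega
  have hsucc : arr.length - (j.toNat - 1) = (arr.length - j.toNat) + 1 := by omega
  have hj1 : ((j.toNat - 1 : Nat) : Int) = j - 1 := by omega
  by_cases hc0 : 0 < c
  · rw [if_pos hc0]
    have hcm : prev.get? c = some (pureCount arr (j.toNat - 1) c) := by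
      apply H; rw [hsucc]; exact mem_Tlv_succ arr k _ c hc
    rw [PySem.Dict.getD_of_get?_eq_some _ _ hcm]
    have hpc : pureCount arr j.toNat c =
        pureCount arr (j.toNat - 1) c +
          (if 0 < PySem.List.pyGetD arr (j - 1) 0 ∧ PySem.List.pyGetD arr (j - 1) 0 ≤ c then
            pureCount arr (j.toNat - 1)
              (PySem.Int.floordiv c (PySem.List.pyGetD arr (j - 1) 0)) + 1
          else 0) := by
      rw [show j.toNat = (j.toNat - 1) + 1 by omega]
      simp only [pureCount, if_neg (by omega : ¬ c ≤ 0), hj1, Nat.add_sub_cancel]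
    rw [hpc]
    by_cases hcond : 0 < PySem.List.pyGetD arr (j - 1) 0 ∧ PySem.List.pyGetD arr (j - 1) 0 ≤ c
    · rw [if_pos hcond, if_pos hcond]
      have hdm : prev.get? (PySem.Int.floordiv c (PySem.List.pyGetD arr (j - 1) 0)) =
          some (pureCount arr (j.toNat - 1)
            (PySem.Int.floordiv c (PySem.List.pyGetD arr (j - 1) 0))) := by
        apply H
        rw [hsucc]
        have hm := mem_Tlv_div arr k (arr.length - j.toNat) c hc (by rw [hidx]; exact hcond)
        rw [hidx] at hm
        exact hm
      rw [PySem.Dict.getD_of_get?_eq_some _ _ hdm]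
    · rw [if_neg hcond, if_neg hcond, add_zero]
  · rw [if_neg hc0, if_neg (by omega : ¬ (0 < PySem.List.pyGetD arr (j - 1) 0 ∧
      PySem.List.pyGetD arr (j - 1) 0 ≤ c))]
    exact (pureCount_nonpos arr j.toNat c (by omega)).symm

theorem up_fold (arr : List Int) (k : Int) :
    ∀ (m : Nat) (j : Int), 1 ≤ j → j + m = (arr.length : Int) + 1 →
      ∀ prev, InvB arr k (j.toNat - 1) prev →
        InvB arr k arr.length
          ((PySem.List.pyRange j ((arr.length : Int) + 1) 1).foldl
            (bUp arr ((List.range (arr.length + 1)).map (Tlv arr k)) (arr.length : Int))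
            prev) := by
  intro m
  induction m with
  | zero =>
    intro j h1j hsum prev H
    rw [PySem.List.pyRange_one_eq_nil (by omega), List.foldl_nil]
    have : arr.length = j.toNat - 1 := by omega
    rw [this]
    exact H
  | succ m ih =>
    intro j h1j hsum prev H
    rw [PySem.List.pyRange_one_cons (by omega : j < (arr.length : Int) + 1), List.foldl_cons]
    have H2 := bUp_inv arr k j h1j (by omega) prev H
    exact ih (j + 1) (by omega) (by omega) _ (by rw [show (j + 1).toNat - 1 = j.toNat by omega]; exact H2)

theorem alt_eq_pure (arr : List Int) (k : Int) :
    productSubSeqCount_alt arr k = pureCount arr arr.length k := by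
  unfold productSubSeqCount_alt
  dsimp only
  rw [PySem.List.len_eq, levels_eq arr k]
  have Hbase : InvB arr k 0
      ((PySem.List.pyGetD ((List.range (arr.length + 1)).map (Tlv arr k))
        ((arr.length : Nat) : Int) []).foldl
        (fun (d : PySem.Dict Int Int) c => d.insert c (0 : Int)) PySem.Dict.empty) := by
    rw [levels_get arr k arr.length (le_refl _)]
    intro c hc
    rw [Nat.sub_zero] at hc
    exact build_get? _ (Tlv_nodup arr k _) (fun _ => 0) c hc
  have Hfin := up_fold arr k arr.length 1 (by omega) (by omega) _
    (by rw [show ((1 : Int)).toNat - 1 = 0 from rfl]; exact Hbase)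
  by_cases hk : 0 < k
  · rw [if_pos hk]
    have hmem : k ∈ Tlv arr k (arr.length - arr.length) := by
      rw [Nat.sub_self]
      simp [Tlv, PySem.Set.mem_ofList]
    exact PySem.Dict.getD_of_get?_eq_some _ _ (Hfin k hmem)
  · rw [if_neg hk]
    exact (pureCount_nonpos arr arr.length k (by omega)).symm

-- ----- A-side: DP-table invariant -----
def getc (dp : Array (List Int)) (i j : Int) : Int :=
  PySem.List.pyGetD (aGet dp i) j 0

def Good (K n : Nat) (dp : Array (List Int)) (val : Int → Int → Int) : Prop :=
  dp.size = K + 1 ∧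
  (∀ i : Int, 0 ≤ i → i ≤ K → (aGet dp i).length = n + 1) ∧
  (∀ i j : Int, 0 ≤ i → i ≤ K → 0 ≤ j → j ≤ n → getc dp i j = val i j)

def pcI (arr : List Int) (j cap : Int) : Int := pureCount arr j.toNat cap

def ival (arr : List Int) (i jdone : Int) : Int → Int → Int := fun i' j' =>
  if i' < i then pcI arr j' i'
  else if i' = i ∧ j' ≤ jdone then pcI arr j' i
  else 0

def oval (arr : List Int) (idone : Int) : Int → Int → Int := fun i' j' =>
  if i' ≤ idone then pcI arr j' i' else 0

theorem getD_setD {α : Type} (xs : List α) (i j : Int) (v d : α)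
    (h0 : 0 ≤ i) (hj : 0 ≤ j) (hl : i < (xs.length : Int)) :
    PySem.List.pyGetD (PySem.List.pySetD xs i v) j d = if j = i then v else PySem.List.pyGetD xs j d := by
  have hi' : ((i.toNat : Nat) : Int) = i := by omega
  have hj' : ((j.toNat : Nat) : Int) = j := by omega
  rw [PySem.List.pySetD_of_nonneg xs v h0,
    show xs.set i.toNat v = PySem.List.pySetD xs ((i.toNat : Nat) : Int) v from
      (PySem.List.pySetD_natCast xs i.toNat v).symm,
    ← hj', PySem.List.pyGetD_pySetD_natCast xs i.toNat j.toNat v d (by omega)]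
  split_ifs with h1 h2 h3 <;> first | rfl | omega

theorem setD_setD {α : Type} (xs : List α) (i : Int) (h0 : 0 ≤ i) (u v : α) :
    PySem.List.pySetD (PySem.List.pySetD xs i u) i v = PySem.List.pySetD xs i v := by
  rw [PySem.List.pySetD_of_nonneg xs u h0, PySem.List.pySetD_of_nonneg _ v h0,
    PySem.List.pySetD_of_nonneg xs v h0, List.set_set]

theorem good_congr (K n : Nat) (dp : Array (List Int)) (v w : Int → Int → Int)
    (h : Good K n dp v)
    (hvw : ∀ i j : Int, 0 ≤ i → i ≤ K → 0 ≤ j → j ≤ n → v i j = w i j) :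
    Good K n dp w := by
  obtain ⟨h1, h2, h3⟩ := h
  exact ⟨h1, h2, fun i j a b c d => (h3 i j a b c d).trans (hvw i j a b c d)⟩

theorem pureCount_step (arr : List Int) (j cap : Int) (hj : 1 ≤ j) (hcap : 1 ≤ cap) :
    pureCount arr j.toNat cap =
      pureCount arr (j - 1).toNat cap +
        (if PySem.List.pyGetD arr (j - 1) 0 ≤ cap ∧ 0 < PySem.List.pyGetD arr (j - 1) 0 then
          pureCount arr (j - 1).toNat (PySem.Int.floordiv cap (PySem.List.pyGetD arr (j - 1) 0)) + 1
        else 0) := by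
  have hm : j.toNat = (j - 1).toNat + 1 := by omega
  have hcast : (((j - 1).toNat : Nat) : Int) = j - 1 := by omega
  rw [hm]
  simp only [pureCount, if_neg (by omega : ¬ cap ≤ 0), hcast]
  congr 1
  by_cases hc2 : 0 < PySem.List.pyGetD arr (j - 1) 0 ∧ PySem.List.pyGetD arr (j - 1) 0 ≤ cap
  · rw [if_pos hc2, if_pos ⟨hc2.2, hc2.1⟩]
  · rw [if_neg hc2, if_neg (fun h => hc2 ⟨h.2, h.1⟩)]

theorem aGet_aSet (dp : Array (List Int)) (i i' : Int) (row : List Int)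
    (h0 : 0 ≤ i) (h0' : 0 ≤ i') (hl : i < (dp.size : Int)) :
    aGet (aSet dp i row) i' = if i' = i then row else aGet dp i' := by
  unfold aGet aSet
  by_cases he : i' = i
  · subst he
    simp [Array.getD, Array.size_setIfInBounds, show i'.toNat < dp.size by omega]
  · rw [if_neg he]
    have hne : i.toNat ≠ i'.toNat := by omega
    by_cases hlt : i'.toNat < dp.size
    · simp [Array.getD, Array.size_setIfInBounds, hne, hlt]
    · simp [Array.getD, Array.size_setIfInBounds, hlt]

theorem aSet_aSet (dp : Array (List Int)) (i : Int) (u v : List Int) :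
    aSet (aSet dp i u) i v = aSet dp i v := by
  unfold aSet
  exact Array.setIfInBounds_setIfInBounds u

theorem size_aSet (dp : Array (List Int)) (i : Int) (row : List Int) :
    (aSet dp i row).size = dp.size := by
  unfold aSet
  exact Array.size_setIfInBounds

theorem ival_shift (arr : List Int) (i j i2 j2 : Int) (hne : i2 ≠ i ∨ j2 ≠ j) :
    ival arr i (j - 1) i2 j2 = ival arr i j i2 j2 := by
  unfold ival
  split_ifs <;> first | rfl | omega

theorem write_cell (arr : List Int) (K n : Nat) (i j : Int)
    (h1i : 1 ≤ i) (hiK : i ≤ K) (h1j : 1 ≤ j) (hjn : j ≤ n)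
    (dp : Array (List Int)) (H : Good K n dp (ival arr i (j - 1)))
    (w : Int) (hw : w = pcI arr j i) :
    Good K n (aSet dp i (PySem.List.pySetD (aGet dp i) j w))
      (ival arr i j) := by
  obtain ⟨Hlen, Hrow, Hval⟩ := H
  have hidp : i < (dp.size : Int) := by omega
  have hrowlen : (aGet dp i).length = n + 1 := Hrow i (by omega) hiK
  have hjrow : j < ((aGet dp i).length : Int) := by omega
  refine ⟨?_, ?_, ?_⟩
  · rw [size_aSet]; exact Hlen
  · intro i' h0i' hi'K
    rw [aGet_aSet dp i i' _ (by omega) h0i' hidp]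
    split_ifs with he
    · rw [PySem.List.length_pySetD]; exact hrowlen
    · exact Hrow i' h0i' hi'K
  · intro i2 j2 h0i2 hi2K h0j2 hj2n
    unfold getc
    rw [aGet_aSet dp i i2 _ (by omega) h0i2 hidp]
    split_ifs with he
    · rw [he]
      rw [getD_setD _ j j2 _ _ (by omega) h0j2 hjrow]
      split_ifs with hjj
      · rw [hjj, hw]
        simp [ival]
      · have hval := Hval i j2 (by omega) hiK h0j2 hj2n
        unfold getc at hval
        rw [hval]
        exact ival_shift arr i j i j2 (Or.inr hjj)
    · have hval := Hval i2 j2 h0i2 hi2K h0j2 hj2n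
      unfold getc at hval
      rw [hval]
      exact ival_shift arr i j i2 j2 (Or.inl he)

theorem step_inv (arr : List Int) (K n : Nat) (hn : n = arr.length) (i j : Int)
    (h1i : 1 ≤ i) (hiK : i ≤ K) (h1j : 1 ≤ j) (hjn : j ≤ n)
    (dp : Array (List Int)) (H : Good K n dp (ival arr i (j - 1))) :
    Good K n (aStep arr i dp j) (ival arr i j) := by
  obtain ⟨Hlen, Hrow, Hval⟩ := H
  have hidp : i < (dp.size : Int) := by omega
  have hrowlen : (aGet dp i).length = n + 1 := Hrow i (by omega) hiK
  -- the value that ends up in cell (i, j), first write: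
  have hv0 : PySem.List.pyGetD (aGet dp i) (j - 1) 0 =
      pcI arr (j - 1) i := by
    have := Hval i (j - 1) (by omega) hiK (by omega) (by omega)
    unfold getc at this
    rw [this]
    simp [ival]
  unfold aStep
  dsimp only
  by_cases hcond : PySem.List.pyGetD arr (j - 1) 0 ≤ i ∧ 0 < PySem.List.pyGetD arr (j - 1) 0
  · rw [if_pos hcond]
    set a := PySem.List.pyGetD arr (j - 1) 0 with ha
    set row := aGet dp i with hrow
    set row1 := PySem.List.pySetD row j (PySem.List.pyGetD row (j - 1) 0) with hrow1
    set dp1 := aSet dp i row1 with hdp1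
    have hq1 : 1 ≤ PySem.Int.floordiv i a := by
      rw [PySem.Int.le_floordiv_iff_mul_le hcond.2, one_mul]; exact hcond.1
    have hqi : PySem.Int.floordiv i a ≤ i := by
      have h2 : PySem.Int.floordiv i a < i + 1 := by
        rw [PySem.Int.floordiv_lt_iff_lt_mul hcond.2]
        nlinarith [hcond.1, hcond.2]
      omega
    have hrow2 : aGet dp1 i = row1 := by
      rw [hdp1, aGet_aSet dp i i _ (by omega) (by omega) hidp, if_pos rfl]
    -- the second read: dp1[i // a][j - 1]
    have hread : PySem.List.pyGetD (aGet dp1 (PySem.Int.floordiv i a))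
        (j - 1) 0 = pcI arr (j - 1) (PySem.Int.floordiv i a) := by
      rw [hdp1, aGet_aSet dp i (PySem.Int.floordiv i a) _ (by omega) (by omega) hidp]
      split_ifs with he
      · rw [hrow1, getD_setD row (j) (j - 1) _ _ (by omega) (by omega) (by omega),
          if_neg (by omega : ¬ j - 1 = j), hv0, he]
      · have := Hval (PySem.Int.floordiv i a) (j - 1) (by omega) (by omega) (by omega) (by omega)
        unfold getc at this
        rw [this]
        simp only [ival]
        rw [if_pos (by omega : PySem.Int.floordiv i a < i)]
    have hcell : PySem.List.pyGetD row1 j 0 = pcI arr (j - 1) i := by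
      rw [hrow1, getD_setD row j j _ _ (by omega) (by omega) (by omega), if_pos rfl, hv0]
    rw [hrow2, hcell, hread, hrow1, setD_setD row j (by omega), hdp1,
      aSet_aSet dp i]
    refine write_cell arr K n i j h1i hiK h1j hjn dp ⟨Hlen, Hrow, Hval⟩ _ ?_
    unfold pcI
    rw [pureCount_step arr j i h1j (by omega), if_pos hcond]
  · rw [if_neg hcond]
    rw [hv0]
    refine write_cell arr K n i j h1i hiK h1j hjn dp ⟨Hlen, Hrow, Hval⟩ _ ?_
    unfold pcI
    rw [pureCount_step arr j i h1j (by omega), if_neg hcond, add_zero]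

theorem inner_fold (arr : List Int) (K n : Nat) (hn : n = arr.length) (i : Int)
    (h1i : 1 ≤ i) (hiK : i ≤ K) :
    ∀ (m : Nat) (j : Int), 1 ≤ j → j + m = n + 1 →
      ∀ dp, Good K n dp (ival arr i (j - 1)) →
        Good K n ((PySem.List.pyRange j (n + 1) 1).foldl (aStep arr i) dp) (ival arr i n) := by
  intro m
  induction m with
  | zero =>
    intro j h1j hsum dp H
    rw [PySem.List.pyRange_one_eq_nil (by omega), List.foldl_nil]
    rw [show ((n : Nat) : Int) = j - 1 by omega]
    exact H
  | succ m ih =>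
    intro j h1j hsum dp H
    rw [PySem.List.pyRange_one_cons (by omega : j < (n : Int) + 1), List.foldl_cons]
    have H2 := step_inv arr K n hn i j h1i hiK h1j (by omega) dp H
    exact ih (j + 1) (by omega) (by omega) (aStep arr i dp j)
      (by rw [show j + 1 - 1 = j by ring]; exact H2)

theorem outer_fold (arr : List Int) (K n : Nat) (hn : n = arr.length) :
    ∀ (m : Nat) (i : Int), 1 ≤ i → i + m = K + 1 →
      ∀ dp, Good K n dp (oval arr (i - 1)) →
        Good K n ((PySem.List.pyRange i (K + 1) 1).foldl (aOuter arr n) dp) (oval arr K) := by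
  intro m
  induction m with
  | zero =>
    intro i h1i hsum dp H
    rw [PySem.List.pyRange_one_eq_nil (by omega), List.foldl_nil]
    rw [show ((K : Nat) : Int) = i - 1 by omega]
    exact H
  | succ m ih =>
    intro i h1i hsum dp H
    rw [PySem.List.pyRange_one_cons (by omega : i < (K : Int) + 1), List.foldl_cons]
    have Hstart : Good K n dp (ival arr i 0) := by
      refine good_congr K n dp _ _ H ?_
      intro i' j' h0i' hi'K h0j' hj'n
      unfold oval ival
      by_cases h1 : i' ≤ i - 1
      · rw [if_pos h1, if_pos (by omega : i' < i)]
      · rw [if_neg h1, if_neg (by omega : ¬ i' < i)]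
        by_cases h2 : i' = i ∧ j' ≤ 0
        · rw [if_pos h2, show j' = 0 by omega]
          simp [pcI, pureCount]
        · rw [if_neg h2]
    have Hinner : Good K n (aOuter arr n dp i) (ival arr i n) := by
      unfold aOuter
      exact inner_fold arr K n hn i h1i (by omega) n 1 (by omega) (by omega) dp
        (by rw [show (1 : Int) - 1 = 0 from rfl]; exact Hstart)
    have Hoval : Good K n (aOuter arr n dp i) (oval arr i) := by
      refine good_congr K n _ _ _ Hinner ?_
      intro i' j' h0i' hi'K h0j' hj'n
      unfold oval ival
      by_cases h1 : i' < i
      · rw [if_pos h1, if_pos (by omega : i' ≤ i)]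
      · rw [if_neg h1]
        by_cases h2 : i' = i
        · rw [if_pos (⟨h2, hj'n⟩ : i' = i ∧ j' ≤ (n : Int)), if_pos (by omega : i' ≤ i), h2]
        · rw [if_neg (by tauto : ¬(i' = i ∧ j' ≤ (n : Int))), if_neg (by omega : ¬ i' ≤ i)]
    exact ih (i + 1) (by omega) (by omega) (aOuter arr n dp i)
      (by rw [show i + 1 - 1 = i by ring]; exact Hoval)

theorem aGet_toArray (l : List (List Int)) (i : Int) (h0 : 0 ≤ i) (h : i < (l.length : Int)) :
    aGet l.toArray i = l[i.toNat]'(by omega) := by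
  unfold aGet
  rw [Array.getD_eq_getD_getElem?, List.getElem?_toArray, List.getElem?_eq_getElem (by omega)]
  rfl

theorem a_eq_pure (arr : List Int) (k : Int) (hk : 0 ≤ k) :
    productSubSeqCount arr k = pureCount arr arr.length k := by
  unfold productSubSeqCount
  dsimp only
  have hlen : PySem.List.len arr = ((arr.length : Nat) : Int) := PySem.List.len_eq arr
  have hkK : k = ((k.toNat : Nat) : Int) := by omega
  rw [hlen, hkK]
  set K := k.toNat with hK
  set n := arr.length with hn
  have Hinit : Good K n
      ((PySem.List.pyRange 0 ((K : Int) + 1) 1).map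
        (fun _ => (PySem.List.pyRange 0 ((n : Int) + 1) 1).map (fun _ => (0 : Int)))).toArray
      (oval arr 0) := by
    refine ⟨?_, ?_, ?_⟩
    · rw [List.size_toArray, List.length_map, PySem.List.length_pyRange_one]; omega
    · intro i' h0i' hi'K
      rw [aGet_toArray _ _ h0i' (by
        rw [List.length_map, PySem.List.length_pyRange_one]; omega), List.getElem_map]
      rw [List.length_map, PySem.List.length_pyRange_one]; omega
    · intro i' j' h0i' hi'K h0j' hj'n
      unfold getc
      rw [aGet_toArray _ _ h0i' (by
        rw [List.length_map, PySem.List.length_pyRange_one]; omega), List.getElem_map]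
      rw [PySem.List.pyGetD_map_pyRange_of_nonneg _ _ _ _ h0j' (by omega)]
      unfold oval
      split_ifs with h1
      · rw [show i' = 0 by omega]
        exact (pureCount_nonpos arr (j'.toNat) 0 (by omega)).symm
      · rfl
  have Hfinal := outer_fold arr K n hn K 1 (by omega) (by omega) _
    (by rw [show (1 : Int) - 1 = 0 from rfl]; exact Hinit)
  obtain ⟨H1, H2, Hval⟩ := Hfinal
  have hv := Hval (K : Int) (n : Int) (by omega) (by omega) (by omega) (by omega)
  unfold getc at hv
  rw [hv]
  unfold oval
  rw [if_pos (le_refl ((K : Int)))]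
  unfold pcI
  rw [show ((n : Int)).toNat = n by omega]

-- ===== VERDICT (by name: the statement is the Claim_ definition above) =====
theorem productSubSeqCount_spec : Claim_equal_productSubSeqCount := by
  intro arr k _ hpre
  unfold Spec_productSubSeqCount
  rw [a_eq_pure arr k hpre, alt_eq_pure]
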